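-- pv_equiv track=rewrite | github.com/aorursy/KT_dataset_py | as3eem_prob-stat-2-nlp-prof-shad.py | check_F2
-- ===== SOURCE A (Python) =====
-- negation_words = ["No","Not","None","No one","Neither","Doesn’t","Isn’t","Wasn’t","Shouldn’t","Wouldn’t","Couldn’t","Won’t","Can’t","Don’t"]
--
-- def check_F2(token):
--     question_m = 0
--     exclamation_m = 0
--     period = 0
--     url=0
--     negation = 0
--
--     for tok in token:
--         if not question_m and '?' in tok:
--             question_m+=1
--         if not exclamation_m and '!' in tok:
--             exclamation_m+=1
--         if not period and '...' in tok:
--             period+=1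
--         if not url and ('http' in tok or '.com' in tok):
--             url+=1
--         if not negation and (tok in negation_words):
--             negation+=1
--
--     return question_m, exclamation_m, period, url, negation
-- ===== SOURCE B (Python) =====
-- negation_words = ["No","Not","None","No one","Neither","Doesn’t","Isn’t","Wasn’t","Shouldn’t","Wouldn’t","Couldn’t","Won’t","Can’t","Don’t"]
--
-- def check_F2(token):
--     question_m = int(any('?' in tok for tok in token))
--     exclamation_m = int(any('!' in tok for tok in token))
--     period = int(any('...' in tok for tok in token))
--     url = int(any('http' in tok or '.com' in tok for tok in token))
--     negation = int(any(tok in negation_words for tok in token))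
--     return question_m, exclamation_m, period, url, negation
-- ===== Notes on version B (the rewrite author's own statement) =====
-- stated objective: simpler
-- what changed: Replaces the single fused loop maintaining five mutable flags with five independent short-circuiting any() scans, one per feature, each wrapped in int().
import Mathlib
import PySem

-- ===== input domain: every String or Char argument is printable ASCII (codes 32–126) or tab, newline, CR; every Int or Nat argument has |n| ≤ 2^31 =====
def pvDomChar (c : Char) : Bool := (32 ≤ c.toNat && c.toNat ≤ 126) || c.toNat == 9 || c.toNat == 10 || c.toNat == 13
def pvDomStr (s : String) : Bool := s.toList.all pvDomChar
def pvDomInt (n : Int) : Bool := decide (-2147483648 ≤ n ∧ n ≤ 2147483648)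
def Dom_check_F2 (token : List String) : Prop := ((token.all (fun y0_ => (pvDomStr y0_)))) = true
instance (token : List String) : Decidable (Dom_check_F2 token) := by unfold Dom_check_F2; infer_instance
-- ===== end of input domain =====

-- B replaces A's single fused five-flag loop with five independent any-scans (objective: simpler).

-- ===== PORT A =====
def pvNegationWords : List String := ["No","Not","None","No one","Neither","Doesn’t","Isn’t","Wasn’t","Shouldn’t","Wouldn’t","Couldn’t","Won’t","Can’t","Don’t"]

-- one iteration of A's for-loop (the five sticky-flag updates, in A's order)
def pvStep (s : Int × Int × Int × Int × Int) (tok : String) : Int × Int × Int × Int × Int :=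
  let (q, e, p, u, n) := s
  let q := if q == 0 && PySem.Str.isIn "?" tok then q + 1 else q
  let e := if e == 0 && PySem.Str.isIn "!" tok then e + 1 else e
  let p := if p == 0 && PySem.Str.isIn "..." tok then p + 1 else p
  let u := if u == 0 && (PySem.Str.isIn "http" tok || PySem.Str.isIn ".com" tok) then u + 1 else u
  let n := if n == 0 && pvNegationWords.contains tok then n + 1 else n
  (q, e, p, u, n)

def check_F2 (token : List String) : Int × Int × Int × Int × Int :=
  token.foldl pvStep ((0 : Int), (0 : Int), (0 : Int), (0 : Int), (0 : Int))

-- ===== PORT B =====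
-- int(b)
def pvBoolInt (b : Bool) : Int := if b then 1 else 0

def check_F2_alt (token : List String) : Int × Int × Int × Int × Int :=
  (pvBoolInt (token.any (fun tok => PySem.Str.isIn "?" tok)),
   pvBoolInt (token.any (fun tok => PySem.Str.isIn "!" tok)),
   pvBoolInt (token.any (fun tok => PySem.Str.isIn "..." tok)),
   pvBoolInt (token.any (fun tok => PySem.Str.isIn "http" tok || PySem.Str.isIn ".com" tok)),
   pvBoolInt (token.any (fun tok => pvNegationWords.contains tok)))

-- ===== PRECONDITION & SPEC =====
def Spec_check_F2 (token : List String) (out : Int × Int × Int × Int × Int) : Prop := out = check_F2_alt token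
instance (token : List String) (out : Int × Int × Int × Int × Int) : Decidable (Spec_check_F2 token out) := by unfold Spec_check_F2; infer_instance

-- ===== CLAIM (what is proved, stated in full; the proofs are below) =====
def Claim_equal_check_F2 : Prop := ∀ (token : List String), Dom_check_F2 token → Spec_check_F2 token (check_F2 token)

-- ===== LEMMAS AND PROOFS =====

-- how one sticky flag looks after folding the rest of the list from value x
def pvFlag (x : Int) (b : Bool) : Int := if x == 0 && b then 1 else x

lemma pvFlag_step (x : Int) (c b : Bool) :
    pvFlag (if x == 0 && c then x + 1 else x) b = pvFlag x (c || b) := by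
  unfold pvFlag; by_cases hx : x = 0 <;> cases c <;> cases b <;> simp [hx]

lemma check_F2_foldl (token : List String) : ∀ (q e p u n : Int),
    token.foldl pvStep (q, e, p, u, n)
    = (pvFlag q (token.any (fun tok => PySem.Str.isIn "?" tok)),
       pvFlag e (token.any (fun tok => PySem.Str.isIn "!" tok)),
       pvFlag p (token.any (fun tok => PySem.Str.isIn "..." tok)),
       pvFlag u (token.any (fun tok => PySem.Str.isIn "http" tok || PySem.Str.isIn ".com" tok)),
       pvFlag n (token.any (fun tok => pvNegationWords.contains tok))) := by
  induction token with
  | nil => intro q e p u n; simp [pvFlag]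
  | cons t ts ih =>
    intro q e p u n
    simp only [List.foldl_cons, List.any_cons, pvStep]
    rw [ih]
    simp only [pvFlag_step]

theorem check_F2_spec : Claim_equal_check_F2 := by
  intro token _
  unfold Spec_check_F2 check_F2 check_F2_alt
  rw [check_F2_foldl]
  simp [pvFlag, pvBoolInt]
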